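-- pv_equiv track=rewrite | github.com/only4anonymous/OOTSM | lib/supervised/sga/scene_sayer_ode_three_stage_copy.py | _group_segments_by_object_inference
-- ===== SOURCE A (Python) =====
-- from collections import defaultdict
--
-- def _group_segments_by_object_inference(segments):
--     obj_dict = defaultdict(list)
--     for seg in segments:
--         obj_class = seg["object_class"]
--         obj_dict[obj_class].append(seg)
--     for oc in obj_dict:
--         obj_dict[oc].sort(key=lambda x: x["start_time"])
--     return dict(obj_dict)
-- ===== SOURCE B (Python) =====
-- def _group_segments_by_object_inference(segments):
--     # keys in first-appearance order, exactly like A's defaultdict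
--     obj_dict = {seg["object_class"]: [] for seg in segments}
--     # one stable global sort; stability makes each group come out sorted by start_time
--     for seg in sorted(segments, key=lambda x: x["start_time"]):
--         obj_dict[seg["object_class"]].append(seg)
--     return obj_dict
-- ===== Notes on version B (the rewrite author's own statement) =====
-- stated objective: simpler
-- what changed: Replaces per-group in-place sorts after grouping by one global stable sort followed by a single grouping pass into a dict comprehension's pre-built groups.
import Mathlib
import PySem

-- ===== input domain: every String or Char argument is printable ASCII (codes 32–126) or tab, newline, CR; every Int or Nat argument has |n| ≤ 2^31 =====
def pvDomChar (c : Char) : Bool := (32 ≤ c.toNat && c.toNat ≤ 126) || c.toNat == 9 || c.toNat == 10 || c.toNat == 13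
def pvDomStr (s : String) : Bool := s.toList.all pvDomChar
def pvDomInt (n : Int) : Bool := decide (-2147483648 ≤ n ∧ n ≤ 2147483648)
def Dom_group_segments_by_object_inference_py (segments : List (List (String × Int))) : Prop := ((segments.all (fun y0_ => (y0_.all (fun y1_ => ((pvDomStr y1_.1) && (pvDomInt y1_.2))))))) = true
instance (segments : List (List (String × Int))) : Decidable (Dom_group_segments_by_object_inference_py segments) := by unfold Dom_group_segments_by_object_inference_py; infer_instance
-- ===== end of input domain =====

-- B replaces A's per-group in-place sorts by one global stable sort followed by a single
-- grouping pass (same asymptotic cost; simpler). Return-value equivalence only: A mutates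
-- no caller-visible data, B likewise.


-- ===== PORT A =====
-- seg["object_class"] / seg["start_time"]; the default 0 is never reached under
-- Pre_ (which requires both keys present; Python raises KeyError otherwise).
def pvOC (seg : List (String × Int)) : Int := (PySem.Dict.mk seg).getD "object_class" 0
def pvST (seg : List (String × Int)) : Int := (PySem.Dict.mk seg).getD "start_time" 0

def group_segments_by_object_inference_py (segments : List (List (String × Int))) : List (Int × List (List (String × Int))) :=
  -- obj_dict = defaultdict(list); for seg: obj_dict[seg["object_class"]].append(seg)
  let obj_dict := segments.foldl (fun d seg => d.modify (pvOC seg) [] (· ++ [seg])) PySem.Dict.empty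
  -- for oc in obj_dict: obj_dict[oc].sort(key=lambda x: x["start_time"])
  let obj_dict2 := obj_dict.keys.foldl (fun d oc => d.modify oc [] (fun g => PySem.List.sorted g pvST false)) obj_dict
  obj_dict2.items

-- ===== PORT B =====
def group_segments_by_object_inference_py_alt (segments : List (List (String × Int))) : List (Int × List (List (String × Int))) :=
  -- obj_dict = {seg["object_class"]: [] for seg in segments}
  let d0 := segments.foldl (fun d seg => d.insert (pvOC seg) ([] : List (List (String × Int)))) PySem.Dict.empty
  -- for seg in sorted(segments, key=lambda x: x["start_time"]): obj_dict[k].append(seg)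
  let d1 := (PySem.List.sorted segments pvST false).foldl (fun d seg => d.modify (pvOC seg) [] (· ++ [seg])) d0
  d1.items

-- ===== PRECONDITION & SPEC =====
-- Pre_ excludes exactly the inputs where the Python raises KeyError: some segment
-- lacks the key "object_class" or "start_time".
def Pre_group_segments_by_object_inference_py (segments : List (List (String × Int))) : Prop :=
  ∀ seg ∈ segments, (PySem.Dict.mk seg).contains "object_class" = true ∧ (PySem.Dict.mk seg).contains "start_time" = true
instance (segments : List (List (String × Int))) : Decidable (Pre_group_segments_by_object_inference_py segments) := by unfold Pre_group_segments_by_object_inference_py; infer_instance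
def pvWitness_group_segments_by_object_inference_py : (List (List (String × Int))) :=
  ([[("object_class", 1), ("start_time", 5)], [("object_class", 1), ("start_time", 2)], [("object_class", 2), ("start_time", 3)]])
def Spec_group_segments_by_object_inference_py (segments : List (List (String × Int))) (out : List (Int × List (List (String × Int)))) : Prop := out = group_segments_by_object_inference_py_alt segments
instance (segments : List (List (String × Int))) (out : List (Int × List (List (String × Int)))) : Decidable (Spec_group_segments_by_object_inference_py segments out) := by unfold Spec_group_segments_by_object_inference_py; infer_instance

-- ===== CLAIM (what is proved, stated in full; the proofs are below) =====
def Claim_equal_group_segments_by_object_inference_py : Prop := ∀ (segments : List (List (String × Int))), Dom_group_segments_by_object_inference_py segments → Pre_group_segments_by_object_inference_py segments → Spec_group_segments_by_object_inference_py segments (group_segments_by_object_inference_py segments)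

-- ===== LEMMAS AND PROOFS =====

-- insertBy puts x in front when it sorts before every element
theorem insertBy_cons_of_before {α : Type} (before : α → α → Bool) (x : α) (l : List α)
    (h : ∀ z ∈ l, before x z = true) : PySem.List.insertBy before x l = x :: l := by
  cases l with
  | nil => rfl
  | cons y t => simp [PySem.List.insertBy, h y (List.mem_cons_self)]

-- filtering commutes with a single stable insertion into a sorted list
theorem filter_insertBy {α κ : Type} [LinearOrder κ] (key : α → κ) (p : α → Bool) (x : α) :
    ∀ ys : List α, ys.Pairwise (fun a b => key a ≤ key b) →
    (PySem.List.insertBy (fun a b => decide (key a < key b)) x ys).filter p =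
      if p x then PySem.List.insertBy (fun a b => decide (key a < key b)) x (ys.filter p)
      else ys.filter p := by
  intro ys
  induction ys with
  | nil => intro _; by_cases hp : p x = true <;> simp [PySem.List.insertBy, hp]
  | cons y t ih =>
    intro hpw
    have hpt : t.Pairwise (fun a b => key a ≤ key b) := hpw.tail
    have hhead : ∀ z ∈ t, key y ≤ key z := (fun z hz => List.rel_of_pairwise_cons hpw hz)
    by_cases hb : key x < key y
    · have hlt : ∀ z ∈ (y :: t).filter p, decide (key x < key z) = true := by
        intro z hz
        have hz' : z ∈ y :: t := List.mem_of_mem_filter hz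
        rcases List.mem_cons.mp hz' with h | h
        · subst h; simpa using hb
        · have := hhead z h; simp; exact lt_of_lt_of_le hb this
      have : PySem.List.insertBy (fun a b => decide (key a < key b)) x (y :: t) = x :: y :: t := by
        simp [PySem.List.insertBy, hb]
      rw [this]
      by_cases hp : p x = true
      · simp only [hp, if_true, List.filter_cons_of_pos hp]
        rw [insertBy_cons_of_before _ _ _ hlt]
      · simp only [List.filter_cons_of_neg (by simpa using hp)]
        simp [hp]
    · have : PySem.List.insertBy (fun a b => decide (key a < key b)) x (y :: t) =
          y :: PySem.List.insertBy (fun a b => decide (key a < key b)) x t := by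
        simp [PySem.List.insertBy, hb]
      rw [this]
      by_cases hpy : p y = true
      · rw [List.filter_cons_of_pos hpy, ih hpt, List.filter_cons_of_pos hpy]
        by_cases hp : p x = true
        · simp only [hp, if_true]
          rw [show PySem.List.insertBy (fun a b => decide (key a < key b)) x (y :: t.filter p) =
              y :: PySem.List.insertBy (fun a b => decide (key a < key b)) x (t.filter p) by
            simp [PySem.List.insertBy, hb]]
        · simp [hp]
      · rw [List.filter_cons_of_neg (by simpa using hpy), ih hpt,
          List.filter_cons_of_neg (by simpa using hpy)]

-- filtering commutes with a stable sort
theorem filter_sorted {α κ : Type} [LinearOrder κ] (key : α → κ) (p : α → Bool) (xs : List α) :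
    (PySem.List.sorted xs key false).filter p = PySem.List.sorted (xs.filter p) key false := by
  induction xs using List.reverseRecOn with
  | nil => rfl
  | append_singleton xs x ih =>
    rw [PySem.List.sorted_eq_foldl_insertBy, List.foldl_append, List.foldl_cons, List.foldl_nil,
      ← PySem.List.sorted_eq_foldl_insertBy]
    rw [filter_insertBy key p x _ (PySem.List.sorted_pairwise xs key), ih, List.filter_append]
    by_cases hp : p x = true
    · simp only [List.filter_cons_of_pos hp, List.filter_nil, hp, if_true]
      rw [PySem.List.sorted_eq_foldl_insertBy (xs.filter p ++ [x]), List.foldl_append,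
        List.foldl_cons, List.foldl_nil, ← PySem.List.sorted_eq_foldl_insertBy]
    · simp [List.filter_cons_of_neg (by simpa using hp), hp]

-- a dict whose every stored value is [] keeps getD · [] = []
theorem getD_foldl_insert_nil (l : List (List (String × Int))) :
    ∀ (d : PySem.Dict Int (List (List (String × Int)))),
    (∀ c, d.getD c [] = []) → ∀ c,
    (l.foldl (fun d seg => d.insert (pvOC seg) ([] : List (List (String × Int)))) d).getD c [] = [] := by
  induction l with
  | nil => intro d h c; exact h c
  | cons s t ih =>
    intro d h c
    refine ih _ (fun c' => ?_) c
    rw [PySem.Dict.getD_insert]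
    split_ifs with h' <;> [rfl; exact h c']

-- A's second loop: sort the group at every key of K, once each
theorem getD_foldl_modify_sort (K : List Int) :
    ∀ (d : PySem.Dict Int (List (List (String × Int)))), K.Nodup → ∀ c,
    (K.foldl (fun d oc => d.modify oc [] (fun g => PySem.List.sorted g pvST false)) d).getD c [] =
      if c ∈ K then PySem.List.sorted (d.getD c []) pvST false else d.getD c [] := by
  induction K with
  | nil => intro d _ c; simp
  | cons k K ih =>
    intro d hnd c
    rw [List.foldl_cons, ih _ hnd.of_cons c, PySem.Dict.getD_modify]
    have hk : k ∉ K := (List.nodup_cons.mp hnd).1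
    by_cases hcK : c ∈ K
    · have : c ≠ k := fun h => hk (h ▸ hcK)
      simp [hcK, this, List.mem_cons]
    · by_cases hck : c = k
      · subst hck; simp [hcK]
      · simp [hcK, hck, List.mem_cons]

-- grouping loop keyed by pvOC, via the pair-list lemma
theorem getD_group_loop (l : List (List (String × Int)))
    (d : PySem.Dict Int (List (List (String × Int)))) (c : Int) :
    (l.foldl (fun d seg => d.modify (pvOC seg) [] (· ++ [seg])) d).getD c [] =
      d.getD c [] ++ l.filter (fun s => pvOC s == c) := by
  have h := PySem.Dict.getD_foldl_modify_append (l.map (fun s => (pvOC s, s))) d c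
  rw [List.foldl_map] at h
  simpa [List.filter_map, Function.comp_def] using h

-- all keys of the grouping dict
theorem keys_groupA (segments : List (List (String × Int))) :
    (segments.foldl (fun d seg => d.modify (pvOC seg) [] (· ++ [seg])) PySem.Dict.empty).keys =
      PySem.Set.ofList (segments.map pvOC) := by
  rw [PySem.Dict.keys_foldl_modify_key segments pvOC [] (fun _ seg => (· ++ [seg]))]
  rw [PySem.Dict.keys_empty, PySem.Set.update_nil_left]

theorem update_self_of_subset (K : List Int) (xs : List Int) (h : ∀ y ∈ xs, y ∈ K) :
    PySem.Set.update K xs = K := by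
  rw [PySem.Set.update_eq_append_filter]
  have : ((PySem.Set.ofList xs).filter (fun y => !PySem.Set.contains K y)) = [] := by
    rw [List.filter_eq_nil_iff]
    intro y hy
    have hyK : y ∈ K := h y ((PySem.Set.mem_ofList xs y).mp hy)
    simpa using hyK
  rw [this, List.append_nil]

theorem getD_A (segments : List (List (String × Int))) (c : Int) :
    (((segments.foldl (fun d seg => d.modify (pvOC seg) [] (· ++ [seg])) PySem.Dict.empty)).keys.foldl
        (fun d oc => d.modify oc [] (fun g => PySem.List.sorted g pvST false))
        (segments.foldl (fun d seg => d.modify (pvOC seg) [] (· ++ [seg])) PySem.Dict.empty)).getD c [] =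
      PySem.List.sorted (segments.filter (fun s => pvOC s == c)) pvST false := by
  set d1 := segments.foldl (fun d seg => d.modify (pvOC seg) [] (· ++ [seg])) PySem.Dict.empty with hd1
  have hkeys : d1.keys = PySem.Set.ofList (segments.map pvOC) := keys_groupA segments
  have hnd : d1.keys.Nodup := by rw [hkeys]; exact PySem.Set.nodup_ofList _
  rw [getD_foldl_modify_sort d1.keys d1 hnd c]
  have hget : d1.getD c [] = segments.filter (fun s => pvOC s == c) := by
    rw [hd1, getD_group_loop]; simp
  by_cases hc : c ∈ d1.keys
  · rw [hget]; simp [hc]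
  · have hnil : segments.filter (fun s => pvOC s == c) = [] := by
      rw [List.filter_eq_nil_iff]
      intro s hs hoc
      exact hc (by
        rw [hkeys, PySem.Set.mem_ofList]
        exact List.mem_map.mpr ⟨s, hs, by simpa using hoc⟩)
    simp [hc, hget, hnil, show PySem.List.sorted ([] : List (List (String × Int))) pvST false = [] from rfl]

theorem getD_B (segments : List (List (String × Int))) (c : Int) :
    (((PySem.List.sorted segments pvST false).foldl (fun d seg => d.modify (pvOC seg) [] (· ++ [seg]))
        (segments.foldl (fun d seg => d.insert (pvOC seg) ([] : List (List (String × Int)))) PySem.Dict.empty))).getD c [] =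
      PySem.List.sorted (segments.filter (fun s => pvOC s == c)) pvST false := by
  rw [getD_group_loop]
  rw [getD_foldl_insert_nil segments PySem.Dict.empty (fun c => PySem.Dict.getD_empty c []) c]
  rw [List.nil_append, filter_sorted pvST (fun s => pvOC s == c) segments]

theorem keys_AB (segments : List (List (String × Int))) :
    (((segments.foldl (fun d seg => d.modify (pvOC seg) [] (· ++ [seg])) PySem.Dict.empty)).keys.foldl
        (fun d oc => d.modify oc [] (fun g => PySem.List.sorted g pvST false))
        (segments.foldl (fun d seg => d.modify (pvOC seg) [] (· ++ [seg])) PySem.Dict.empty)).keys =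
      PySem.Set.ofList (segments.map pvOC) ∧
    (((PySem.List.sorted segments pvST false).foldl (fun d seg => d.modify (pvOC seg) [] (· ++ [seg]))
        (segments.foldl (fun d seg => d.insert (pvOC seg) ([] : List (List (String × Int)))) PySem.Dict.empty))).keys =
      PySem.Set.ofList (segments.map pvOC) := by
  constructor
  · rw [show (fun (d : PySem.Dict Int (List (List (String × Int)))) (oc : Int) =>
        d.modify oc [] (fun g => PySem.List.sorted g pvST false)) =
        (fun d oc => d.modify (id oc) [] ((fun (_ : PySem.Dict Int (List (List (String × Int)))) (_ : Int) g =>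
          PySem.List.sorted g pvST false) d oc)) from rfl]
    rw [PySem.Dict.keys_foldl_modify_key _ id [] _ _, keys_groupA, List.map_id]
    exact update_self_of_subset _ _ (fun y hy => hy)
  · rw [PySem.Dict.keys_foldl_modify_key _ pvOC [] (fun _ seg => (· ++ [seg])) _,
      PySem.Dict.keys_foldl_insert_key _ pvOC (fun _ _ => []) _]
    rw [PySem.Dict.keys_empty, PySem.Set.update_nil_left]
    refine update_self_of_subset _ _ (fun y hy => ?_)
    rcases List.mem_map.mp hy with ⟨s, hs, rfl⟩
    have hs' : s ∈ segments := (PySem.List.mem_sorted segments pvST false s).mp hs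
    exact (PySem.Set.mem_ofList _ _).mpr (List.mem_map.mpr ⟨s, hs', rfl⟩)

-- ===== VERDICT (by name: the statement is the Claim_ definition above) =====
theorem group_segments_by_object_inference_py_spec : Claim_equal_group_segments_by_object_inference_py := by
  intro segments _ _
  unfold Spec_group_segments_by_object_inference_py
  unfold group_segments_by_object_inference_py group_segments_by_object_inference_py_alt
  simp only []
  obtain ⟨hkA, hkB⟩ := keys_AB segments
  rw [PySem.Dict.items_eq_map_keys _ (by rw [hkA]; exact PySem.Set.nodup_ofList _) [],
    PySem.Dict.items_eq_map_keys _ (by rw [hkB]; exact PySem.Set.nodup_ofList _) [],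
    hkA, hkB]
  refine List.map_congr_left (fun k _ => ?_)
  rw [getD_A segments k, getD_B segments k]
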